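-- pv_equiv track=rewrite | github.com/sunliang711/init | tools/nomad/nomad_tools/common.py | is_quiet_help
-- ===== SOURCE A (Python) =====
-- from typing import Iterable, Sequence
--
-- def is_quiet_help(argv: Sequence[str]) -> bool:
--     if not argv:
--         return True
--     if argv[0] in {"help", "-h", "--help"}:
--         return True
--     for arg in argv:
--         if arg == "--":
--             return False
--         if arg in {"-h", "--help"}:
--             return True
--     return False
-- ===== SOURCE B (Python) =====
-- def is_quiet_help(argv):
--     if not argv:
--         return True
--     if argv[0] in ("help", "-h", "--help"):
--         return True
--     absent = len(argv)
--
--     def pos(tok):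
--         try:
--             return argv.index(tok)
--         except ValueError:
--             return absent
--
--     # True iff the earliest help flag occurs strictly before the first "--"
--     return min(pos("-h"), pos("--help")) < pos("--")
-- ===== Notes on version B (the rewrite author's own statement) =====
-- stated objective: alternative
-- what changed: Replaces A's single interleaved scan (return at a help flag, stop at '--') by index arithmetic: compute the first positions of '-h', '--help' and '--' (len(argv) if absent) and return whether the earliest help-flag position is strictly before the first '--'.
import Mathlib
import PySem

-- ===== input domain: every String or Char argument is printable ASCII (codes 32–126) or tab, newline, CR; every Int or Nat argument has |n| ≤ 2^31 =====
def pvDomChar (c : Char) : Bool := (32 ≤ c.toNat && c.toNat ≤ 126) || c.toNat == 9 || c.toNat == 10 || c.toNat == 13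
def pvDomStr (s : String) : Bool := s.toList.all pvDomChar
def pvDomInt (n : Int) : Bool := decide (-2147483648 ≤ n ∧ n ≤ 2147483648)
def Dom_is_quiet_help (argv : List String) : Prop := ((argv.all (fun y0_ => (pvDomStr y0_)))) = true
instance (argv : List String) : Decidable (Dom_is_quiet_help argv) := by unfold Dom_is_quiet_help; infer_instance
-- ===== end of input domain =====

-- B replaces A's single interleaved scan by index arithmetic: compare the earliest help-flag position with the first '--' position (alternative decomposition).


-- ===== PORT A =====
-- the 'for arg in argv' loop: stop with False at '--', True at a help flag
def isQuietHelpLoop : List String → Bool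
  | [] => false
  | a :: rest =>
    if a = "--" then false
    else if a = "-h" ∨ a = "--help" then true
    else isQuietHelpLoop rest

def is_quiet_help (argv : List String) : Bool :=
  match argv with
  | [] => true
  | a0 :: _ =>
    if a0 = "help" ∨ a0 = "-h" ∨ a0 = "--help" then true
    else isQuietHelpLoop argv

-- ===== PORT B =====
-- pos(tok): argv.index(tok), or len(argv) if absent (the except ValueError branch)
def posOf (argv : List String) (tok : String) : Nat :=
  match PySem.List.index? argv tok with
  | some k => k
  | none => argv.length

def is_quiet_help_alt (argv : List String) : Bool :=
  match argv with
  | [] => true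
  | a0 :: _ =>
    if a0 = "help" ∨ a0 = "-h" ∨ a0 = "--help" then true
    else decide (min (posOf argv "-h") (posOf argv "--help") < posOf argv "--")

-- ===== PRECONDITION & SPEC =====
def Spec_is_quiet_help (argv : List String) (out : Bool) : Prop := out = is_quiet_help_alt argv
instance (argv : List String) (out : Bool) : Decidable (Spec_is_quiet_help argv out) := by unfold Spec_is_quiet_help; infer_instance

-- ===== CLAIM (what is proved, stated in full; the proofs are below) =====
def Claim_equal_is_quiet_help : Prop := ∀ (argv : List String), Dom_is_quiet_help argv → Spec_is_quiet_help argv (is_quiet_help argv)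

-- ===== LEMMAS AND PROOFS =====

theorem posOf_cons_self (rest : List String) (tok : String) :
    posOf (tok :: rest) tok = 0 := by
  rw [posOf, PySem.List.index?_eq_idxOf?]
  simp [List.idxOf?_cons]

theorem posOf_cons_of_ne (a tok : String) (rest : List String) (h : a ≠ tok) :
    posOf (a :: rest) tok = posOf rest tok + 1 := by
  unfold posOf
  rw [PySem.List.index?_cons_of_ne rest h]
  cases PySem.List.index? rest tok <;> simp [List.length_cons]

-- A's scan equals 'earliest help-flag position strictly before the first "--"'
theorem isQuietHelpLoop_eq_pos (xs : List String) :
    isQuietHelpLoop xs =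
      decide (min (posOf xs "-h") (posOf xs "--help") < posOf xs "--") := by
  induction xs with
  | nil => simp [isQuietHelpLoop, posOf, PySem.List.index?]
  | cons a rest ih =>
    by_cases hdd : a = "--"
    · subst hdd
      have h1 : ("--" : String) ≠ "-h" := by decide
      have h2 : ("--" : String) ≠ "--help" := by decide
      simp [isQuietHelpLoop, posOf_cons_self, posOf_cons_of_ne _ _ _ h1,
        posOf_cons_of_ne _ _ _ h2]
    · by_cases hh : a = "-h"
      · subst hh
        have h2 : ("-h" : String) ≠ "--help" := by decide
        have h3 : ("-h" : String) ≠ "--" := by decide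
        simp [isQuietHelpLoop, posOf_cons_self, posOf_cons_of_ne _ _ _ h2,
          posOf_cons_of_ne _ _ _ h3]
      · by_cases hH : a = "--help"
        · subst hH
          have h1 : ("--help" : String) ≠ "-h" := by decide
          have h3 : ("--help" : String) ≠ "--" := by decide
          simp [isQuietHelpLoop, posOf_cons_self, posOf_cons_of_ne _ _ _ h1,
            posOf_cons_of_ne _ _ _ h3]
        · have hnp : ¬(a = "-h" ∨ a = "--help") := by tauto
          simp only [isQuietHelpLoop, if_neg hdd, if_neg hnp, ih,
            posOf_cons_of_ne _ _ _ hh, posOf_cons_of_ne _ _ _ hH,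
            posOf_cons_of_ne _ _ _ hdd]
          by_cases h : min (posOf rest "-h") (posOf rest "--help") < posOf rest "--" <;>
            simp [h] <;> omega

-- ===== VERDICT (by name: the statement is the Claim_ definition above) =====
theorem is_quiet_help_spec : Claim_equal_is_quiet_help := by
  unfold Claim_equal_is_quiet_help
  intro argv _
  unfold Spec_is_quiet_help is_quiet_help is_quiet_help_alt
  cases argv with
  | nil => rfl
  | cons a0 rest =>
    by_cases h0 : a0 = "help" ∨ a0 = "-h" ∨ a0 = "--help"
    · simp [h0]
    · simp only [h0, if_false]
      exact isQuietHelpLoop_eq_pos (a0 :: rest)
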